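-- pv_equiv track=rewrite | github.com/zxwitsme/oj | 73/73.py | solution
-- ===== SOURCE A (Python) =====
-- def solution(line):
--   l = len(line)
--   result = 0
--   count = 0
--   for i in range(l):
--     if line[i] == '?':
--       count += 1
--     else:
--       if i > 0:
--         if line[i-1] != '?' and line[i] == line[i-1]:
--           result += 1
--       if count == 0:
--         continue
--       if count%2 == 0 and i-count-1 >= 0:
--         if line[i-count-1] == line[i]:
--           result += 1
--       elif i-count-1 >= 0:
--         if line[i-count-1] != line[i]:
--           result += 1
--       count = 0
--
--   return result
-- ===== SOURCE B (Python) =====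
-- def solution(line):
--     pairs = [(i, c) for i, c in enumerate(line) if c != '?']
--     total = 0
--     for (p, a), (q, b) in zip(pairs, pairs[1:]):
--         if ((q - p - 1) % 2 == 0) == (a == b):
--             total += 1
--     return total
-- ===== Notes on version B (the rewrite author's own statement) =====
-- stated objective: simpler
-- what changed: Replaces A's per-character state machine (pending-'?' counter, index arithmetic back into the string, two parity branches) by a single pairwise pass over the non-'?' characters paired with their indices, deciding each consecutive pair by gap parity in one unified condition.
import Mathlib
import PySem

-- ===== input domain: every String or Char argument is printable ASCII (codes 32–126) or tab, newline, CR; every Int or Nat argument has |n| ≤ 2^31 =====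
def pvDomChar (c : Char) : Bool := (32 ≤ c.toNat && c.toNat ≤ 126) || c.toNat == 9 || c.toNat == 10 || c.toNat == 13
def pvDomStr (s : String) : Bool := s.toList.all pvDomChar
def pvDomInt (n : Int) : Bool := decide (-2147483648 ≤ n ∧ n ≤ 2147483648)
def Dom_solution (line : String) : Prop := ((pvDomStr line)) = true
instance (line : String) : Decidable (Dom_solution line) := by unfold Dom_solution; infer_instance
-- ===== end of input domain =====

-- B replaces A's per-character state machine (counter of pending '?') by a single pairwise
-- pass over the non-'?' characters with their indices, deciding each pair by gap parity (simpler).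

-- ===== PORT A =====
-- loop body of A's 'for i in range(l)'; state = (result, count)
def pvBodyA (cs : List Char) (st : Int × Int) (i : Int) : Int × Int :=
  let result := st.1
  let count := st.2
  if PySem.List.pyGetD cs i ' ' = '?' then (result, count + 1)
  else
    let result :=
      if 0 < i then
        (if PySem.List.pyGetD cs (i-1) ' ' ≠ '?' ∧
            PySem.List.pyGetD cs i ' ' = PySem.List.pyGetD cs (i-1) ' '
         then result + 1 else result)
      else result
    if count = 0 then (result, count)
    else
      let result :=
        if PySem.Int.mod count 2 = 0 ∧ 0 ≤ i - count - 1 then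
          (if PySem.List.pyGetD cs (i - count - 1) ' ' = PySem.List.pyGetD cs i ' '
           then result + 1 else result)
        else if 0 ≤ i - count - 1 then
          (if PySem.List.pyGetD cs (i - count - 1) ' ' ≠ PySem.List.pyGetD cs i ' '
           then result + 1 else result)
        else result
      (result, 0)

def solution (line : String) : Int :=
  ((PySem.List.pyRange 0 (line.toList.length : Int) 1).foldl (pvBodyA line.toList) (0, 0)).1

-- ===== PORT B =====
-- pairs = [(i, c) for i, c in enumerate(line) if c != '?']
def pvPairs (cs : List Char) : List (Int × Char) :=
  (PySem.List.enumerate cs 0).filter (fun p => decide (p.2 ≠ '?'))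

def solution_alt (line : String) : Int :=
  let pairs := pvPairs line.toList
  (pairs.zip pairs.tail).foldl
    (fun total pr =>
      if (PySem.Int.mod (pr.2.1 - pr.1.1 - 1) 2 = 0) = (pr.1.2 = pr.2.2) then total + 1 else total)
    0

-- ===== PRECONDITION & SPEC =====
def Spec_solution (line : String) (out : Int) : Prop := out = solution_alt line
instance (line : String) (out : Int) : Decidable (Spec_solution line out) := by unfold Spec_solution; infer_instance

-- ===== CLAIM (what is proved, stated in full; the proofs are below) =====
def Claim_equal_solution : Prop := ∀ (line : String), Dom_solution line → Spec_solution line (solution line)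

-- ===== LEMMAS AND PROOFS =====

-- contribution of one consecutive pair of non-'?' characters in B
def pvStepB (x y : Int × Char) : Int :=
  if (PySem.Int.mod (y.1 - x.1 - 1) 2 = 0) = (x.2 = y.2) then 1 else 0

-- recursive form of B's pairwise sum
def pvSum : List (Int × Char) → Int
  | [] => 0
  | [_] => 0
  | x :: y :: t => pvStepB x y + pvSum (y :: t)

lemma pvFold_eq_pvSum : ∀ (ps : List (Int × Char)) (acc : Int),
    (ps.zip ps.tail).foldl
      (fun total pr =>
        if (PySem.Int.mod (pr.2.1 - pr.1.1 - 1) 2 = 0) = (pr.1.2 = pr.2.2) then total + 1 else total)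
      acc = acc + pvSum ps
  | [], acc => by simp [pvSum]
  | [x], acc => by simp [pvSum]
  | x :: y :: t, acc => by
      simp only [List.tail_cons, List.zip_cons_cons, List.foldl_cons]
      have := pvFold_eq_pvSum (y :: t)
      simp only [List.tail_cons] at this
      rw [this]
      simp only [pvSum, pvStepB]
      split <;> omega

lemma pvSum_append2 : ∀ (ps : List (Int × Char)) (x y : Int × Char),
    pvSum (ps ++ [x, y]) = pvSum (ps ++ [x]) + pvStepB x y
  | [], x, y => by simp [pvSum]
  | [z], x, y => by simp [pvSum]
  | z :: w :: t, x, y => by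
      simp only [List.cons_append, pvSum]
      have := pvSum_append2 (w :: t) x y
      simp only [List.cons_append] at this
      rw [this]
      ring

-- number of trailing '?' characters
def pvTrail (cs : List Char) : Int :=
  ((cs.reverse.takeWhile (fun c => decide (c = '?'))).length : Int)

lemma pvTrail_nonneg (cs : List Char) : 0 ≤ pvTrail cs := by
  simp [pvTrail]

lemma pvTrail_append (cs : List Char) (c : Char) :
    pvTrail (cs ++ [c]) = if c = '?' then pvTrail cs + 1 else 0 := by
  by_cases h : c = '?' <;> simp [pvTrail, h]

lemma pvGetD_at_length (cs : List Char) (c : Char) (ys : List Char) (d : Char) :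
    PySem.List.pyGetD (cs ++ c :: ys) ((cs.length : Int)) d = c := by
  rw [PySem.List.pyGetD_natCast]
  simp [List.getD_eq_getElem?_getD]

lemma pvPairs_append (cs : List Char) (c : Char) :
    pvPairs (cs ++ [c]) =
      pvPairs cs ++ (if c = '?' then [] else [((cs.length : Int), c)]) := by
  by_cases h : c = '?' <;>
    simp [pvPairs, PySem.List.enumerate_append, PySem.List.enumerate_cons, List.filter_append, h]

-- the loop invariant of A, proved by induction on the string from the right
lemma pvMain (cs : List Char) :
    (∀ ys, (PySem.List.pyRange 0 (cs.length : Int) 1).foldl (pvBodyA (cs ++ ys)) (0, 0)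
            = (pvSum (pvPairs cs), pvTrail cs))
    ∧ (pvPairs cs = [] → pvTrail cs = (cs.length : Int))
    ∧ (∀ ps p a, pvPairs cs = ps ++ [(p, a)] →
        0 ≤ p ∧ p + 1 + pvTrail cs = (cs.length : Int) ∧ a ≠ '?' ∧
        (∀ ys d, PySem.List.pyGetD (cs ++ ys) p d = a))
    ∧ (0 < pvTrail cs → ∀ ys d, PySem.List.pyGetD (cs ++ ys) ((cs.length : Int) - 1) d = '?') := by
  induction cs using List.reverseRecOn with
  | nil =>
      refine ⟨?_, ?_, ?_, ?_⟩
      · intro ys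
        simp [PySem.List.pyRange_one_eq_nil, pvPairs, pvSum, pvTrail, PySem.List.enumerate_nil]
      · intro _; simp [pvTrail]
      · intro ps p a h; simp [pvPairs, PySem.List.enumerate_nil] at h
      · intro h; simp [pvTrail] at h
  | append_singleton cs c ih =>
      obtain ⟨ih1, ih2, ih3, ih4⟩ := ih
      have hK0 : 0 ≤ pvTrail cs := pvTrail_nonneg cs
      have hassoc : ∀ ys : List Char, (cs ++ [c]) ++ ys = cs ++ (c :: ys) := by
        intro ys; simp
      have hlen : (((cs ++ [c]).length : Nat) : Int) = (cs.length : Int) + 1 := by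
        simp
      by_cases hc : c = '?'
      · -- appended character is another '?': pairs unchanged, trailing run grows
        subst hc
        have hP : pvPairs (cs ++ ['?']) = pvPairs cs := by
          rw [pvPairs_append]; simp
        have hT : pvTrail (cs ++ ['?']) = pvTrail cs + 1 := by
          rw [pvTrail_append]; simp
        refine ⟨?_, ?_, ?_, ?_⟩
        · intro ys
          rw [hlen, PySem.List.pyRange_one_succ_right (Int.natCast_nonneg _),
              List.foldl_append, hassoc ys, ih1 ('?' :: ys)]
          simp only [List.foldl_cons, List.foldl_nil]
          rw [hP, hT]
          simp only [pvBodyA, pvGetD_at_length]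
          simp
        · intro h; rw [hP] at h; rw [hT, hlen, ih2 h]
        · intro ps p a h
          rw [hP] at h
          obtain ⟨hp0, hpk, ha, hread⟩ := ih3 ps p a h
          refine ⟨hp0, by rw [hT, hlen]; omega, ha, ?_⟩
          intro ys d; rw [hassoc ys]; exact hread ('?' :: ys) d
        · intro _ ys d
          rw [hassoc ys, hlen]
          have : (cs.length : Int) + 1 - 1 = ((cs.length : Nat) : Int) := by omega
          rw [this, pvGetD_at_length]
      · -- appended character is concrete: it forms one new pair with the previous one
        have hP : pvPairs (cs ++ [c]) = pvPairs cs ++ [((cs.length : Int), c)] := by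
          rw [pvPairs_append]; simp [hc]
        have hT : pvTrail (cs ++ [c]) = 0 := by
          rw [pvTrail_append]; simp [hc]
        refine ⟨?_, ?_, ?_, ?_⟩
        · intro ys
          rw [hlen, PySem.List.pyRange_one_succ_right (Int.natCast_nonneg _),
              List.foldl_append, hassoc ys, ih1 (c :: ys)]
          simp only [List.foldl_cons, List.foldl_nil]
          rw [hP, hT]
          simp only [pvBodyA, pvGetD_at_length]
          rw [if_neg hc]
          rcases List.eq_nil_or_concat (pvPairs cs) with hPnil | ⟨ps, ⟨p, a⟩, hps⟩
          · -- no earlier non-'?' character: nothing is added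
            have hKn : pvTrail cs = (cs.length : Int) := ih2 hPnil
            rw [hPnil]
            rcases Nat.eq_zero_or_pos cs.length with hn | hn
            · obtain rfl : cs = [] := List.length_eq_zero_iff.mp hn
              have ht0 : pvTrail ([] : List Char) = 0 := by simp [pvTrail]
              rw [ht0]
              simp only [List.length_nil, Nat.cast_zero]
              simp [pvSum]
            · have hq := ih4 (by omega) (c :: ys) ' '
              rw [hq]
              clear ih1 ih2 ih3 ih4 hassoc hlen hP hT hPnil
              simp [pvSum]
              rw [if_neg (show ¬ pvTrail cs = 0 by omega),
                  if_neg (show ¬ (2 ∣ pvTrail cs ∧ 1 ≤ (cs.length : Int) - pvTrail cs) by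
                    rintro ⟨-, h⟩; omega),
                  if_neg (show ¬ (1 ≤ (cs.length : Int) - pvTrail cs) by omega)]
          · -- the previous non-'?' character is at index p with value a
            rw [List.concat_eq_append] at hps
            obtain ⟨hp0, hpk, ha, hread⟩ := ih3 ps p a hps
            have hsum : pvSum (pvPairs cs ++ [((cs.length : Int), c)])
                = pvSum (pvPairs cs) + pvStepB (p, a) ((cs.length : Int), c) := by
              rw [hps, List.append_assoc]
              have h2 := pvSum_append2 ps (p, a) ((cs.length : Int), c)
              simpa using h2
            rw [hsum, pvStepB]
            have hgap : (cs.length : Int) - p - 1 = pvTrail cs := by omega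
            rw [hgap]
            rcases (eq_or_lt_of_le hK0) with hK | hK
            · -- gap 0: the two characters are adjacent
              have hpn : (cs.length : Int) - 1 = p := by omega
              rw [hpn, hread (c :: ys) ' ']
              clear ih1 ih2 ih3 ih4 hassoc hlen hP hT hps hread hsum
              simp [eq_iff_iff]
              have hdvd : 2 ∣ pvTrail cs := by omega
              have hn : 0 < cs.length := by omega
              rw [if_pos hK.symm, if_pos hn]
              by_cases hac : a = c
              · rw [if_pos ⟨ha, hac.symm⟩, if_pos ⟨fun _ => hac, fun _ => hdvd⟩]
                rw [← hK]
              · rw [if_neg (fun h => hac h.2.symm), if_neg (fun h => hac (h.mp hdvd))]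
                rw [← hK, add_zero]
            · -- positive gap of '?': the parity branch fires
              have hq := ih4 hK (c :: ys) ' '
              have hidx : (cs.length : Int) - pvTrail cs - 1 = p := by omega
              rw [hq, hidx, hread (c :: ys) ' ']
              clear ih1 ih2 ih3 ih4 hassoc hlen hP hT hps hread hsum hq
              simp [eq_iff_iff]
              rw [if_neg (show ¬ pvTrail cs = 0 by omega)]
              by_cases hd : 2 ∣ pvTrail cs
              · by_cases hac : a = c
                · rw [if_pos ⟨hd, hp0⟩, if_pos hac, if_pos ⟨fun _ => hac, fun _ => hd⟩]
                · rw [if_pos ⟨hd, hp0⟩, if_neg hac, if_neg (fun h => hac (h.mp hd)), add_zero]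
              · by_cases hac : a = c
                · rw [if_neg (fun h => hd h.1), if_pos hp0, if_pos hac,
                      if_neg (fun h => hd (h.mpr hac)), add_zero]
                · rw [if_neg (fun h => hd h.1), if_pos hp0, if_neg hac,
                      if_pos ⟨fun h => absurd h hd, fun h => absurd h hac⟩]
        · intro h; rw [hP] at h; simp at h
        · intro ps p a h
          rw [hP] at h
          have h2 := congrArg List.reverse h
          simp only [List.reverse_append, List.reverse_cons, List.reverse_nil,
            List.nil_append, List.cons_append, List.cons.injEq] at h2
          obtain ⟨h3, h4⟩ := h2
          injection h3 with h5 h6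
          subst h5
          subst h6
          refine ⟨Int.natCast_nonneg _, by rw [hT, hlen]; omega, hc, ?_⟩
          intro ys d; rw [hassoc ys]; exact pvGetD_at_length cs c ys d
        · intro h; rw [hT] at h; omega

-- ===== VERDICT (by name: the statement is the Claim_ definition above) =====
theorem solution_spec : Claim_equal_solution := by
  intro line _
  unfold Spec_solution solution solution_alt
  rw [pvFold_eq_pvSum]
  have h := (pvMain line.toList).1 []
  simp only [List.append_nil] at h
  rw [h]
  simp
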